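-- pv_equiv track=rewrite | github.com/ofilla/pip-review | pip_review/__main__.py | filter_forwards
-- ===== SOURCE A (Python) =====
-- def filter_forwards(args, exclude):
--     """ Return only the parts of `args` that do not appear in `exclude`. """
--     result = []
--     # Start with false, because an unknown argument not starting with a dash
--     # probably would just trip pip.
--     admitted = False
--     for arg in args:
--         if not arg.startswith('-'):
--             # assume this belongs with the previous argument.
--             if admitted:
--                 result.append(arg)
--         elif arg.lstrip('-') in exclude:
--             admitted = False
--         else:
--             result.append(arg)
--             admitted = True
--     return result
-- ===== SOURCE B (Python) =====
-- def filter_forwards(args, exclude):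
--     """ Return only the parts of `args` that do not appear in `exclude`. """
--     # Pass 1: group each dash-option with the non-dash values that follow it;
--     # non-dash args before the first option belong to no group and are dropped.
--     groups = []
--     i = 0
--     n = len(args)
--     while i < n:
--         if args[i].startswith('-'):
--             j = i + 1
--             while j < n and not args[j].startswith('-'):
--                 j += 1
--             groups.append((args[i], args[i + 1:j]))
--             i = j
--         else:
--             i += 1
--     # Pass 2: keep whole groups whose option is not excluded.
--     out = []
--     for opt, vals in groups:
--         if opt.lstrip('-') not in exclude:
--             out.append(opt)
--             out.extend(vals)
--     return out
-- ===== Notes on version B (the rewrite author's own statement) =====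
-- stated objective: alternative
-- what changed: B replaces A's single traversal with a carried 'admitted' flag by two passes: first group each dash-option with its following non-dash values, then keep or drop whole groups by the option's lstrip('-') key.
import Mathlib
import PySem

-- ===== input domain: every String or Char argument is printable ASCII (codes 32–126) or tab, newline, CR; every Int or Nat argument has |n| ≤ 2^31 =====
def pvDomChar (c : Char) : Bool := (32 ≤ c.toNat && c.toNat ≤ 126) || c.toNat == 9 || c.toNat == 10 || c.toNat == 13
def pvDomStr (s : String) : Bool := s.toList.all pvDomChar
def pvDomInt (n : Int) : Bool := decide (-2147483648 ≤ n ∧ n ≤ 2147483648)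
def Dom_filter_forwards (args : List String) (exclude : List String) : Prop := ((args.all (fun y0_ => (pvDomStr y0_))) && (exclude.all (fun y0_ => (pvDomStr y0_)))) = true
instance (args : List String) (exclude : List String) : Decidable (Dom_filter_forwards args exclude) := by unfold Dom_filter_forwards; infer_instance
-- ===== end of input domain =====

-- B regroups the args into option-with-values groups in one pass and then filters
-- whole groups, instead of A's carried 'admitted' flag; alternative decomposition, same cost.


-- ===== PORT A =====
-- arg.lstrip('-') : strip leading '-' characters (exact: the chars argument is ASCII '-')
def pvLstripDash (s : String) : String := String.ofList (s.toList.dropWhile (· == '-'))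

-- not arg.startswith('-')
def pvNotDash (s : String) : Bool := ¬ PySem.Str.startswith s "-"

-- the for-loop over args carrying the `admitted` flag; `result` is emitted in order
def filterFoldA (exclude : List String) (l : List String) (admitted : Bool) : List String :=
  match l with
  | [] => []
  | arg :: rest =>
    if pvNotDash arg then
      (if admitted then arg :: filterFoldA exclude rest admitted
       else filterFoldA exclude rest admitted)
    else if exclude.contains (pvLstripDash arg) then
      filterFoldA exclude rest false
    else
      arg :: filterFoldA exclude rest true

def filter_forwards (args : List String) (exclude : List String) : List String :=
  filterFoldA exclude args false

-- ===== PORT B =====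
-- pass 1: group each dash option with the following non-dash values
def pvGroupArgs (l : List String) : List (String × List String) :=
  match l with
  | [] => []
  | a :: rest =>
    if pvNotDash a then
      pvGroupArgs rest
    else
      (a, rest.takeWhile pvNotDash) :: pvGroupArgs (rest.dropWhile pvNotDash)
termination_by l.length
decreasing_by
  · simp
  · have := List.length_dropWhile_le pvNotDash rest
    simp; omega

def filter_forwards_alt (args : List String) (exclude : List String) : List String :=
  (pvGroupArgs args).flatMap (fun g =>
    if ¬ exclude.contains (pvLstripDash g.1) then g.1 :: g.2 else [])

-- ===== PRECONDITION & SPEC =====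
def Spec_filter_forwards (args : List String) (exclude : List String) (out : List String) : Prop := out = filter_forwards_alt args exclude
instance (args : List String) (exclude : List String) (out : List String) : Decidable (Spec_filter_forwards args exclude out) := by unfold Spec_filter_forwards; infer_instance

-- ===== CLAIM (what is proved, stated in full; the proofs are below) =====
def Claim_equal_filter_forwards : Prop := ∀ (args : List String) (exclude : List String), Dom_filter_forwards args exclude → Spec_filter_forwards args exclude (filter_forwards args exclude)

-- ===== LEMMAS AND PROOFS =====

theorem pvGroupArgs_nil : pvGroupArgs [] = [] := by
  rw [pvGroupArgs.eq_def]

theorem pvGroupArgs_cons_nondash (a : String) (rest : List String) (h : pvNotDash a = true) :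
    pvGroupArgs (a :: rest) = pvGroupArgs rest := by
  rw [pvGroupArgs.eq_def]; simp [h]

theorem pvGroupArgs_cons_dash (a : String) (rest : List String) (h : pvNotDash a = false) :
    pvGroupArgs (a :: rest) =
      (a, rest.takeWhile pvNotDash) :: pvGroupArgs (rest.dropWhile pvNotDash) := by
  rw [pvGroupArgs.eq_def]; simp [h]

-- grouping skips leading non-dash args one at a time = dropping them all at once
theorem pvGroupArgs_dropWhile (l : List String) :
    pvGroupArgs (l.dropWhile pvNotDash) = pvGroupArgs l := by
  induction l with
  | nil => rfl
  | cons a rest ih =>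
    by_cases h : pvNotDash a = true
    · rw [List.dropWhile_cons, if_pos h, ih, pvGroupArgs_cons_nondash a rest h]
    · rw [List.dropWhile_cons, if_neg h]

-- main invariant: the A-loop from state `admitted` equals the pending non-dash values
-- (kept iff admitted) followed by B's filtering of the remaining groups
theorem filterFoldA_eq (exclude : List String) :
    ∀ n (l : List String), l.length ≤ n → ∀ (b : Bool),
    filterFoldA exclude l b =
      (if b then l.takeWhile pvNotDash else []) ++
      (pvGroupArgs (l.dropWhile pvNotDash)).flatMap (fun g =>
        if ¬ exclude.contains (pvLstripDash g.1) then g.1 :: g.2 else []) := by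
  intro n
  induction n with
  | zero =>
    intro l hl b
    have : l = [] := List.length_eq_zero_iff.mp (Nat.le_zero.mp hl)
    subst this; cases b <;> simp [filterFoldA, pvGroupArgs_nil]
  | succ n ih =>
    intro l hl b
    match l with
    | [] => cases b <;> simp [filterFoldA, pvGroupArgs_nil]
    | a :: rest =>
      have hr : rest.length ≤ n := by simpa using hl
      by_cases h : pvNotDash a = true
      · -- non-dash argument
        rw [filterFoldA, if_pos h, List.dropWhile_cons, if_pos h]
        cases b with
        | false => rw [ih rest hr false]; simp
        | true =>
          rw [ih rest hr true]
          simp [h]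
      · -- dash argument: dropWhile stops here, a new group starts
        have h' : pvNotDash a = false := by simpa using h
        rw [List.dropWhile_cons, if_neg h, pvGroupArgs_cons_dash a rest h']
        rw [filterFoldA, if_neg h]
        by_cases hx : exclude.contains (pvLstripDash a) = true
        · rw [if_pos hx, ih rest hr false]
          rw [pvGroupArgs_dropWhile rest]
          have hm : pvLstripDash a ∈ exclude := by simpa using hx
          simp [List.flatMap_cons, hm, h']
        · rw [if_neg hx, ih rest hr true]
          rw [pvGroupArgs_dropWhile rest]
          have hm : pvLstripDash a ∉ exclude := by simpa using hx
          simp [List.flatMap_cons, hm, h']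

-- ===== VERDICT (by name: the statement is the Claim_ definition above) =====
theorem filter_forwards_spec : Claim_equal_filter_forwards := by
  intro args exclude _
  unfold Spec_filter_forwards filter_forwards filter_forwards_alt
  rw [filterFoldA_eq exclude args.length args le_rfl false]
  rw [pvGroupArgs_dropWhile]
  simp
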